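-- pv_equiv track=rewrite | github.com/Tarsnap/tarsnap | tools/man_to_zsh.py | special_case_list_archives_f
-- ===== SOURCE A (Python) =====
-- SPECIAL_CASE_LIST_ARCHIVES_F = '  "-f[specify hash of archive name' \
--     ' to operate on (requires --hashes)]:tapehash"'
--
-- def special_case_list_archives_f(zsh_output):
--     outlines = []
--
--     section = ""
--     for line in zsh_output.split("\n"):
--         if line.startswith("_shtab_tarsnap__"):
--             # Get the remainder of that line, other than the last 2 chars
--             section = line[len("_shtab_tarsnap__"):-2]
--         elif section != "list_archives_options":
--             pass
--         elif not line.startswith("  \"-f[specify name"):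
--             pass
--         else:
--             # Modify output of -f for this special case.
--             line = SPECIAL_CASE_LIST_ARCHIVES_F
--
--         outlines.append(line)
--
--     zsh_output = "\n".join(outlines)
--
--     return zsh_output
-- ===== SOURCE B (Python) =====
-- SPECIAL_CASE_LIST_ARCHIVES_F = '  "-f[specify hash of archive name' \
--     ' to operate on (requires --hashes)]:tapehash"'
--
-- _HDR = "_shtab_tarsnap__"
--
--
-- def special_case_list_archives_f(zsh_output):
--     lines = zsh_output.split("\n")
--     n = len(lines)
--     out = []
--     i = 0
--     while i < n:
--         # Start of a block: an optional header line determines the section name.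
--         if lines[i].startswith(_HDR):
--             name = lines[i][len(_HDR):-2]
--             out.append(lines[i])
--             i += 1
--         else:
--             name = ""
--         # The block body runs until the next header line.
--         start = i
--         while i < n and not lines[i].startswith(_HDR):
--             i += 1
--         block = lines[start:i]
--         if name == "list_archives_options":
--             block = [SPECIAL_CASE_LIST_ARCHIVES_F
--                      if l.startswith('  "-f[specify name') else l
--                      for l in block]
--         out.extend(block)
--     return "\n".join(out)
-- ===== Notes on version B (the rewrite author's own statement) =====
-- stated objective: alternative
-- what changed: A's flat line loop carrying scalar state is replaced by a block traversal: the line list is partitioned into header-delimited blocks, the -f rewrite is mapped over whole blocks, and the blocks are flattened back and joined.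
import Mathlib
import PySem

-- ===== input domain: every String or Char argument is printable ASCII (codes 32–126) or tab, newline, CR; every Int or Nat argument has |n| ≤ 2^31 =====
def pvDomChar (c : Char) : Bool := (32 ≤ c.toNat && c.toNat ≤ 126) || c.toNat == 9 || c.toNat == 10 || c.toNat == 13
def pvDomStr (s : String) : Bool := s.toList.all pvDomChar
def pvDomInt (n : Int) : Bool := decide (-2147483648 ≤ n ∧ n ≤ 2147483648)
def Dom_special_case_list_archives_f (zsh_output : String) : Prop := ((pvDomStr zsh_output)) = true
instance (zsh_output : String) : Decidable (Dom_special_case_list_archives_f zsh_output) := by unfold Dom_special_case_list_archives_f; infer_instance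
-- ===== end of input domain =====

-- B replaces A's scalar-section flat loop by a block traversal: the line list is cut into
-- header-delimited blocks and the -f rewrite is mapped over whole blocks (objective: alternative decomposition, same cost).

def SPECIAL_CASE_LIST_ARCHIVES_F : String :=
  "  \"-f[specify hash of archive name to operate on (requires --hashes)]:tapehash\""

-- ===== PORT A =====
-- A's for-loop over split lines, carried as a foldl over the state (section, outlines).
def pvAStep (st : String × List String) (line : String) : String × List String :=
  let sec := st.1
  let outlines := st.2
  if PySem.Str.startswith line "_shtab_tarsnap__" then
    (PySem.Str.slice line (some 16) (some (-2)), outlines ++ [line])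
  else if sec ≠ "list_archives_options" then
    (sec, outlines ++ [line])
  else if ¬ (PySem.Str.startswith line "  \"-f[specify name" = true) then
    (sec, outlines ++ [line])
  else
    (sec, outlines ++ [SPECIAL_CASE_LIST_ARCHIVES_F])

def special_case_list_archives_f (zsh_output : String) : String :=
  let res := ((PySem.Str.split? zsh_output "\n").getD []).foldl pvAStep ("", [])
  PySem.Str.join "\n" res.2

-- ===== PORT B =====
-- Source B's header test: a line that is NOT a section header
def pvNotHdr (l : String) : Bool := !PySem.Str.startswith l "_shtab_tarsnap__"

-- the per-block rewrite Source B applies via its list comprehension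
def pvFixLine (name l : String) : String :=
  if (name = "list_archives_options" && PySem.Str.startswith l "  \"-f[specify name") then
    SPECIAL_CASE_LIST_ARCHIVES_F
  else l

-- Source B's outer while-loop: consume one block (optional header + body up to next header) per step
def pvBlocks : List String → List String
  | [] => []
  | l :: rest =>
    if pvNotHdr l then
      ((l :: rest).takeWhile pvNotHdr).map (pvFixLine "") ++
        pvBlocks ((l :: rest).dropWhile pvNotHdr)
    else
      let name := PySem.Str.slice l (some 16) (some (-2))
      l :: ((rest.takeWhile pvNotHdr).map (pvFixLine name) ++
        pvBlocks (rest.dropWhile pvNotHdr))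
  termination_by lines => lines.length
  decreasing_by
  · simp only [List.dropWhile_cons, *, if_pos]
    exact Nat.lt_succ_of_le (List.length_dropWhile_le _ _)
  · exact Nat.lt_succ_of_le (List.length_dropWhile_le _ _)

def special_case_list_archives_f_alt (zsh_output : String) : String :=
  PySem.Str.join "\n" (pvBlocks ((PySem.Str.split? zsh_output "\n").getD []))

-- ===== PRECONDITION & SPEC =====
def Spec_special_case_list_archives_f (zsh_output : String) (out : String) : Prop := out = special_case_list_archives_f_alt zsh_output
instance (zsh_output : String) (out : String) : Decidable (Spec_special_case_list_archives_f zsh_output out) := by unfold Spec_special_case_list_archives_f; infer_instance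

-- ===== CLAIM (what is proved, stated in full; the proofs are below) =====
def Claim_equal_special_case_list_archives_f : Prop := ∀ (zsh_output : String), Dom_special_case_list_archives_f zsh_output → Spec_special_case_list_archives_f zsh_output (special_case_list_archives_f zsh_output)

-- ===== LEMMAS AND PROOFS =====

-- recursive characterization of the lines A's loop emits, starting from section s
def pvALines : List String → String → List String
  | [], _ => []
  | l :: rest, s =>
    if PySem.Str.startswith l "_shtab_tarsnap__" then
      l :: pvALines rest (PySem.Str.slice l (some 16) (some (-2)))
    else
      pvFixLine s l :: pvALines rest s

theorem pvALines_cons (l : String) (rest : List String) (s : String) :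
    pvALines (l :: rest) s =
      if PySem.Str.startswith l "_shtab_tarsnap__" then
        l :: pvALines rest (PySem.Str.slice l (some 16) (some (-2)))
      else
        pvFixLine s l :: pvALines rest s := rfl

theorem pvAStep_foldl (lines : List String) (s : String) (acc : List String) :
    (lines.foldl pvAStep (s, acc)).2 = acc ++ pvALines lines s := by
  induction lines generalizing s acc with
  | nil => simp [pvALines]
  | cons l rest ih =>
    rw [List.foldl_cons]
    by_cases h : PySem.Str.startswith l "_shtab_tarsnap__" = true
    · have e : pvAStep (s, acc) l = (PySem.Str.slice l (some 16) (some (-2)), acc ++ [l]) := by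
        simp only [pvAStep]; rw [if_pos h]
      rw [e, ih, pvALines_cons, if_pos h, List.append_assoc, List.singleton_append]
    · have e : pvAStep (s, acc) l = (s, acc ++ [pvFixLine s l]) := by
        simp only [pvAStep, pvFixLine]
        rw [if_neg h]
        split_ifs <;> first | rfl | simp_all
      rw [e, ih, pvALines_cons, if_neg h, List.append_assoc, List.singleton_append]

theorem pvBlocks_eq (lines : List String) (s : String) :
    (lines.takeWhile pvNotHdr).map (pvFixLine s) ++ pvBlocks (lines.dropWhile pvNotHdr)
      = pvALines lines s := by
  induction hn : lines.length using Nat.strong_induction_on generalizing lines s with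
  | _ n ih =>
    cases lines with
    | nil => simp [pvBlocks, pvALines]
    | cons l rest =>
      have hlt : rest.length < n := by simp at hn; omega
      by_cases h : pvNotHdr l = true
      · have hh : PySem.Str.startswith l "_shtab_tarsnap__" = false := by
          simpa [pvNotHdr] using h
        rw [List.takeWhile_cons_of_pos h, List.dropWhile_cons_of_pos h, List.map_cons,
            pvALines_cons, if_neg (by rw [hh]; simp), List.cons_append]
        exact congrArg (pvFixLine s l :: ·) (ih rest.length hlt rest s rfl)
      · have hh : PySem.Str.startswith l "_shtab_tarsnap__" = true := by
          simpa [pvNotHdr] using h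
        rw [List.takeWhile_cons_of_neg h, List.dropWhile_cons_of_neg h, List.map_nil,
            List.nil_append, pvALines_cons, if_pos hh, pvBlocks, if_neg h]
        exact congrArg (l :: ·) (ih rest.length hlt rest _ rfl)

theorem pvBlocks_eq_main (lines : List String) : pvBlocks lines = pvALines lines "" := by
  cases lines with
  | nil => simp [pvBlocks, pvALines]
  | cons l rest =>
    by_cases h : pvNotHdr l = true
    · rw [pvBlocks, if_pos h]
      exact pvBlocks_eq (l :: rest) ""
    · have := pvBlocks_eq (l :: rest) ""
      rwa [List.takeWhile_cons_of_neg h, List.dropWhile_cons_of_neg h, List.map_nil,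
           List.nil_append] at this

-- ===== VERDICT (by name: the statement is the Claim_ definition above) =====
theorem special_case_list_archives_f_spec : Claim_equal_special_case_list_archives_f := by
  intro zsh_output _
  unfold Spec_special_case_list_archives_f
  simp only [special_case_list_archives_f, special_case_list_archives_f_alt]
  rw [pvAStep_foldl, List.nil_append, pvBlocks_eq_main]
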